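-- pv_equiv track=rewrite | github.com/eshaansdoshi-sketch/DR_Rag | core/bias_detector.py | detect_stance
-- ===== SOURCE A (Python) =====
-- from typing import List, Literal
--
-- _HEDGING_TERMS = [
--     "might", "may", "could", "possibly", "perhaps", "arguably",
--     "it seems", "appears to", "tends to", "likely", "unlikely",
--     "suggest", "suggests", "suggested", "indicate", "indicates",
--     "some experts", "some argue", "it is possible", "remains unclear",
--     "debatable", "uncertain", "questionable", "preliminary",
-- ]
--
-- _STRONG_CLAIM_TERMS = [
--     "clearly", "obviously", "undeniably", "certainly", "definitely",
--     "without question", "proven", "undoubtedly", "always", "never",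
--     "must", "absolutely", "inevitably", "unquestionably", "indisputably",
--     "the fact is", "it is clear", "there is no doubt",
-- ]
--
-- _NEGATION_PREFIXES = [
--     "not ", "no ", "never ", "neither ", "nor ", "cannot ", "isn't ",
--     "doesn't ", "don't ", "won't ", "wouldn't ", "shouldn't ", "hasn't ",
--     "haven't ", "hadn't ", "wasn't ", "weren't ", "couldn't ",
-- ]
--
-- _POSITIVE_TERMS = [
--     "benefit", "advantage", "improvement", "growth", "success",
--     "effective", "efficient", "promising", "breakthrough", "innovation",
--     "progress", "opportunity", "strength", "positive", "gain",
--     "superior", "excellent", "remarkable", "significant achievement",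
-- ]
--
-- _NEGATIVE_TERMS = [
--     "risk", "danger", "threat", "decline", "failure", "harmful",
--     "ineffective", "problematic", "concern", "drawback", "weakness",
--     "negative", "loss", "inferior", "deterioration", "crisis",
--     "obstacle", "limitation", "adverse", "detrimental",
-- ]
--
-- def detect_stance(text: str) -> Literal["pro", "contra", "neutral"]:
--     """Classify text stance as pro, contra, or neutral.
--
--     Uses rule-based analysis:
--       - Hedging vs strong claims
--       - Negation pattern detection
--       - Polarity lexicon scoring
--
--     Returns one of: "pro", "contra", "neutral"
--     """
--     text_lower = text.lower()
--
--     # Count polarity signals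
--     pos_count = sum(1 for term in _POSITIVE_TERMS if term in text_lower)
--     neg_count = sum(1 for term in _NEGATIVE_TERMS if term in text_lower)
--
--     # Negation can flip polarity — check for negated positive/negative terms
--     negation_flips = 0
--     for neg in _NEGATION_PREFIXES:
--         for pos in _POSITIVE_TERMS:
--             if f"{neg}{pos}" in text_lower:
--                 negation_flips += 1
--         for n_term in _NEGATIVE_TERMS:
--             if f"{neg}{n_term}" in text_lower:
--                 negation_flips -= 1  # Negated negative ≈ positive
--
--     # Apply negation adjustments
--     adjusted_pos = max(0, pos_count - negation_flips)
--     adjusted_neg = max(0, neg_count + negation_flips)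
--
--     # Hedging raises neutrality threshold
--     hedging_count = sum(1 for term in _HEDGING_TERMS if term in text_lower)
--     strong_count = sum(1 for term in _STRONG_CLAIM_TERMS if term in text_lower)
--
--     # If heavily hedged, bias toward neutral
--     if hedging_count >= 2 and strong_count == 0:
--         return "neutral"
--
--     # Determine stance from adjusted polarity
--     polarity_diff = adjusted_pos - adjusted_neg
--
--     if polarity_diff >= 2:
--         return "pro"
--     elif polarity_diff <= -2:
--         return "contra"
--     elif polarity_diff == 1 and strong_count >= 1:
--         return "pro"
--     elif polarity_diff == -1 and strong_count >= 1:
--         return "contra"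
--     else:
--         return "neutral"
-- ===== SOURCE B (Python) =====
-- # B: single left-to-right positional scan collecting every matched pattern
-- # (terms and negated-term concatenations) into one set, then set-membership counts.
-- _HEDGING_TERMS = [
--     "might", "may", "could", "possibly", "perhaps", "arguably",
--     "it seems", "appears to", "tends to", "likely", "unlikely",
--     "suggest", "suggests", "suggested", "indicate", "indicates",
--     "some experts", "some argue", "it is possible", "remains unclear",
--     "debatable", "uncertain", "questionable", "preliminary",
-- ]
--
-- _STRONG_CLAIM_TERMS = [
--     "clearly", "obviously", "undeniably", "certainly", "definitely",
--     "without question", "proven", "undoubtedly", "always", "never",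
--     "must", "absolutely", "inevitably", "unquestionably", "indisputably",
--     "the fact is", "it is clear", "there is no doubt",
-- ]
--
-- _NEGATION_PREFIXES = [
--     "not ", "no ", "never ", "neither ", "nor ", "cannot ", "isn't ",
--     "doesn't ", "don't ", "won't ", "wouldn't ", "shouldn't ", "hasn't ",
--     "haven't ", "hadn't ", "wasn't ", "weren't ", "couldn't ",
-- ]
--
-- _POSITIVE_TERMS = [
--     "benefit", "advantage", "improvement", "growth", "success",
--     "effective", "efficient", "promising", "breakthrough", "innovation",
--     "progress", "opportunity", "strength", "positive", "gain",
--     "superior", "excellent", "remarkable", "significant achievement",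
-- ]
--
-- _NEGATIVE_TERMS = [
--     "risk", "danger", "threat", "decline", "failure", "harmful",
--     "ineffective", "problematic", "concern", "drawback", "weakness",
--     "negative", "loss", "inferior", "deterioration", "crisis",
--     "obstacle", "limitation", "adverse", "detrimental",
-- ]
--
-- _NEGATED_POS = [n + p for n in _NEGATION_PREFIXES for p in _POSITIVE_TERMS]
-- _NEGATED_NEG = [n + t for n in _NEGATION_PREFIXES for t in _NEGATIVE_TERMS]
-- _ALL_PATTERNS = (_POSITIVE_TERMS + _NEGATIVE_TERMS + _HEDGING_TERMS
--                  + _STRONG_CLAIM_TERMS + _NEGATED_POS + _NEGATED_NEG)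
--
-- # index the patterns once by their first character
-- _BY_FIRST = {}
-- for _p in _ALL_PATTERNS:
--     _BY_FIRST.setdefault(_p[0], []).append(_p)
--
--
-- def detect_stance(text):
--     t = text.lower()
--     found = set()
--     for i in range(len(t)):
--         for p in _BY_FIRST.get(t[i], ()):
--             if p not in found and t.startswith(p, i):
--                 found.add(p)
--
--     pos_count = sum(1 for x in _POSITIVE_TERMS if x in found)
--     neg_count = sum(1 for x in _NEGATIVE_TERMS if x in found)
--     negation_flips = (sum(1 for x in _NEGATED_POS if x in found)
--                       - sum(1 for x in _NEGATED_NEG if x in found))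
--
--     adjusted_pos = max(0, pos_count - negation_flips)
--     adjusted_neg = max(0, neg_count + negation_flips)
--
--     hedging_count = sum(1 for x in _HEDGING_TERMS if x in found)
--     strong_count = sum(1 for x in _STRONG_CLAIM_TERMS if x in found)
--
--     if hedging_count >= 2 and strong_count == 0:
--         return "neutral"
--
--     polarity_diff = adjusted_pos - adjusted_neg
--     if polarity_diff >= 2:
--         return "pro"
--     elif polarity_diff <= -2:
--         return "contra"
--     elif polarity_diff == 1 and strong_count >= 1:
--         return "pro"
--     elif polarity_diff == -1 and strong_count >= 1:
--         return "contra"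
--     else:
--         return "neutral"
-- ===== Notes on version B (the rewrite author's own statement) =====
-- stated objective: alternative
-- what changed: A runs ~740 independent whole-text substring scans, one per lexicon term and per negation-prefix/term concatenation; B indexes all patterns once by first character and makes a single positional left-to-right scan of the lowercased text, collecting every matched pattern into one found-set whose membership yields all five counts for the unchanged decision rules.
import Mathlib
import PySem

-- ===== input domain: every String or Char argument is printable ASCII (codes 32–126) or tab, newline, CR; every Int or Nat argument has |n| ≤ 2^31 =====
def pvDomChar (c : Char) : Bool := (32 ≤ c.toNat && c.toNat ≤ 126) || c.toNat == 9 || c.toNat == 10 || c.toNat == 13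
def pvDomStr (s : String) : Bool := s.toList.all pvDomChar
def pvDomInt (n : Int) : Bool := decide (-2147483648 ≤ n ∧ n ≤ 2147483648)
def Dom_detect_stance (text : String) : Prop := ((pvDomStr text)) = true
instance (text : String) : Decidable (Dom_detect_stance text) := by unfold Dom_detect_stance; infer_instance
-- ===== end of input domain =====

-- B replaces A's ~740 independent substring scans by one positional scan collecting all
-- matched patterns (terms and negated-term concatenations) into a set, then set-membership
-- counts feed the unchanged decision rules.

-- ===== PORT A =====
-- shared module-level lexicons (used verbatim by both Python versions)
def pvHEDGING : List String :=
  ["might", "may", "could", "possibly", "perhaps", "arguably",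
   "it seems", "appears to", "tends to", "likely", "unlikely",
   "suggest", "suggests", "suggested", "indicate", "indicates",
   "some experts", "some argue", "it is possible", "remains unclear",
   "debatable", "uncertain", "questionable", "preliminary"]

def pvSTRONG : List String :=
  ["clearly", "obviously", "undeniably", "certainly", "definitely",
   "without question", "proven", "undoubtedly", "always", "never",
   "must", "absolutely", "inevitably", "unquestionably", "indisputably",
   "the fact is", "it is clear", "there is no doubt"]

def pvNEGPREF : List String :=
  ["not ", "no ", "never ", "neither ", "nor ", "cannot ", "isn't ",
   "doesn't ", "don't ", "won't ", "wouldn't ", "shouldn't ", "hasn't ",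
   "haven't ", "hadn't ", "wasn't ", "weren't ", "couldn't "]

def pvPOS : List String :=
  ["benefit", "advantage", "improvement", "growth", "success",
   "effective", "efficient", "promising", "breakthrough", "innovation",
   "progress", "opportunity", "strength", "positive", "gain",
   "superior", "excellent", "remarkable", "significant achievement"]

def pvNEG : List String :=
  ["risk", "danger", "threat", "decline", "failure", "harmful",
   "ineffective", "problematic", "concern", "drawback", "weakness",
   "negative", "loss", "inferior", "deterioration", "crisis",
   "obstacle", "limitation", "adverse", "detrimental"]

-- sum(1 for term in terms if term in tl)
def pvCountIn (terms : List String) (tl : String) : Int :=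
  terms.foldl (fun a term => if PySem.Str.isIn term tl then a + 1 else a) 0

-- A's nested negation loop (flips += for negated positive, -= for negated negative)
def pvFlipsA (tl : String) : Int :=
  pvNEGPREF.foldl (fun acc neg =>
    pvNEG.foldl (fun a t => if PySem.Str.isIn (neg ++ t) tl then a - 1 else a)
      (pvPOS.foldl (fun a p => if PySem.Str.isIn (neg ++ p) tl then a + 1 else a) acc)) 0

def detect_stance (text : String) : String :=
  let tl := PySem.Str.lower text
  let pos_count := pvCountIn pvPOS tl
  let neg_count := pvCountIn pvNEG tl
  let negation_flips := pvFlipsA tl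
  let adjusted_pos := max 0 (pos_count - negation_flips)
  let adjusted_neg := max 0 (neg_count + negation_flips)
  let hedging_count := pvCountIn pvHEDGING tl
  let strong_count := pvCountIn pvSTRONG tl
  if 2 ≤ hedging_count ∧ strong_count = 0 then "neutral"
  else
    let polarity_diff := adjusted_pos - adjusted_neg
    if 2 ≤ polarity_diff then "pro"
    else if polarity_diff ≤ -2 then "contra"
    else if polarity_diff = 1 ∧ 1 ≤ strong_count then "pro"
    else if polarity_diff = -1 ∧ 1 ≤ strong_count then "contra"
    else "neutral"

-- ===== PORT B =====
def pvNEGATEDPOS : List String := pvNEGPREF.flatMap (fun n => pvPOS.map (fun p => n ++ p))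
def pvNEGATEDNEG : List String := pvNEGPREF.flatMap (fun n => pvNEG.map (fun t => n ++ t))
def pvALL : List String :=
  pvPOS ++ pvNEG ++ pvHEDGING ++ pvSTRONG ++ pvNEGATEDPOS ++ pvNEGATEDNEG

-- the patterns indexed once by first character (_BY_FIRST; setdefault(p[0], []).append(p))
def pvBY : PySem.Dict Char (List String) :=
  pvALL.foldl (fun d p =>
    match p.toList.head? with
    | some c => d.insert c (d.getD c [] ++ [p])
    | none => d) PySem.Dict.empty  -- none branch unreachable: every pattern is nonempty

-- _BY_FIRST.get(t[i], ()); chars[i]? is exact for the in-range i produced by range(len(t))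
def pvBucketAt (chars : List Char) (i : Nat) : List String :=
  match chars[i]? with
  | some c => pvBY.getD c []
  | none => []

-- the single positional scan: at each index i, try only the patterns whose first
-- character is chars[i] (Python t.startswith(p, i), exact here via List.isPrefixOf on drop i)
def pvScan (chars : List Char) : PySem.Set String :=
  (List.range chars.length).foldl (fun found (i : Nat) =>
    (pvBucketAt chars i).foldl (fun f p =>
      if !(PySem.Set.contains f p) && p.toList.isPrefixOf (chars.drop i)
      then PySem.Set.add f p else f) found) PySem.Set.empty

-- sum(1 for x in terms if x in found)
def pvCountF (terms : List String) (found : PySem.Set String) : Int :=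
  terms.foldl (fun a x => if PySem.Set.contains found x then a + 1 else a) 0

def detect_stance_alt (text : String) : String :=
  let tl := PySem.Str.lower text
  let found := pvScan tl.toList
  let pos_count := pvCountF pvPOS found
  let neg_count := pvCountF pvNEG found
  let negation_flips := pvCountF pvNEGATEDPOS found - pvCountF pvNEGATEDNEG found
  let adjusted_pos := max 0 (pos_count - negation_flips)
  let adjusted_neg := max 0 (neg_count + negation_flips)
  let hedging_count := pvCountF pvHEDGING found
  let strong_count := pvCountF pvSTRONG found
  if 2 ≤ hedging_count ∧ strong_count = 0 then "neutral"
  else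
    let polarity_diff := adjusted_pos - adjusted_neg
    if 2 ≤ polarity_diff then "pro"
    else if polarity_diff ≤ -2 then "contra"
    else if polarity_diff = 1 ∧ 1 ≤ strong_count then "pro"
    else if polarity_diff = -1 ∧ 1 ≤ strong_count then "contra"
    else "neutral"

-- ===== PRECONDITION & SPEC =====
def Spec_detect_stance (text : String) (out : String) : Prop := out = detect_stance_alt text
instance (text : String) (out : String) : Decidable (Spec_detect_stance text out) := by unfold Spec_detect_stance; infer_instance

-- ===== CLAIM (what is proved, stated in full; the proofs are below) =====
def Claim_equal_detect_stance : Prop := ∀ (text : String), Dom_detect_stance text → Spec_detect_stance text (detect_stance text)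

-- ===== LEMMAS AND PROOFS =====

-- the set built by the inner fold over patterns at one position
lemma pvScan_inner (l : List String) (c : String → Bool) (f : PySem.Set String) (q : String) :
    q ∈ l.foldl (fun f p => if !(PySem.Set.contains f p) && c p then PySem.Set.add f p else f) f
      ↔ q ∈ f ∨ (q ∈ l ∧ c q = true) := by
  induction l generalizing f with
  | nil => simp
  | cons p t ih =>
    simp only [List.foldl_cons, ih, List.mem_cons]
    by_cases hc : c p = true
    · by_cases hf : PySem.Set.contains f p = true
      · simp only [hf, hc, Bool.not_true, Bool.false_and]
        constructor
        · rintro (h | h) <;> tauto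
        · rintro (h | ⟨(rfl | h), hcq⟩)
          · tauto
          · exact Or.inl ((PySem.Set.contains_iff f q).mp hf)
          · tauto
      · simp only [hf, hc, Bool.not_false, Bool.true_and, if_true, PySem.Set.mem_add]
        constructor
        · rintro (⟨h | rfl⟩ | h) <;> tauto
        · rintro (h | ⟨(rfl | h), hcq⟩) <;> tauto
    · have hstep : (if !(PySem.Set.contains f p) && c p then PySem.Set.add f p else f) = f := by
        simp [hc]
      rw [hstep]
      constructor
      · rintro (h | h) <;> tauto
      · rintro (h | ⟨(rfl | h), hcq⟩) <;> tauto

def pvMatchAt (chars : List Char) (i : Nat) (q : String) : Bool :=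
  q.toList.isPrefixOf (chars.drop i)

lemma pvMatchAt_iff (chars : List Char) (i : Nat) (q : String) :
    pvMatchAt chars i q = true ↔ q.toList <+: chars.drop i := by
  unfold pvMatchAt
  exact List.isPrefixOf_iff_prefix

-- what the first-character index contains
lemma pvBY_build (l : List String) (d : PySem.Dict Char (List String)) (x : String) (c : Char) :
    x ∈ (l.foldl (fun d p =>
        match p.toList.head? with
        | some cp => d.insert cp (d.getD cp [] ++ [p])
        | none => d) d).getD c []
      ↔ x ∈ d.getD c [] ∨ (x ∈ l ∧ x.toList.head? = some c) := by
  induction l generalizing d with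
  | nil => simp
  | cons p t ih =>
    rw [List.foldl_cons, ih]
    cases hp : p.toList.head? with
    | none =>
      simp only [List.mem_cons]
      constructor
      · rintro (h | h) <;> tauto
      · rintro (h | ⟨(rfl | h), hc⟩) <;> first | tauto | (rw [hp] at hc; cases hc)
    | some cp =>
      rw [PySem.Dict.getD_insert]
      by_cases hcc : c = cp
      · subst hcc
        rw [if_pos rfl]
        simp only [List.mem_append, List.mem_cons]
        constructor
        · rintro ((h | rfl | hf) | h)
          · tauto
          · tauto
          · cases hf
          · tauto
        · rintro (h | ⟨(rfl | h), hc⟩) <;> tauto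
      · simp only [if_neg hcc, List.mem_cons]
        constructor
        · rintro (h | h) <;> tauto
        · rintro (h | ⟨(rfl | h), hc⟩) <;>
            first | tauto | (rw [hp] at hc; cases hc; exact absurd rfl hcc)

lemma pvBY_mem (x : String) (c : Char) :
    x ∈ pvBY.getD c [] ↔ x ∈ pvALL ∧ x.toList.head? = some c := by
  unfold pvBY
  rw [pvBY_build]
  simp

lemma pvScan_fold (chars : List Char) (n : Nat) (q : String) :
    q ∈ (List.range n).foldl (fun found (i : Nat) =>
        (pvBucketAt chars i).foldl (fun f p =>
          if !(PySem.Set.contains f p) && p.toList.isPrefixOf (chars.drop i)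
          then PySem.Set.add f p else f) found) PySem.Set.empty
      ↔ ∃ i < n, q ∈ pvBucketAt chars i ∧ pvMatchAt chars i q = true := by
  induction n with
  | zero => simp [PySem.Set.empty]
  | succ n ih =>
    rw [List.range_succ, List.foldl_append, List.foldl_cons, List.foldl_nil]
    rw [pvScan_inner, ih]
    unfold pvMatchAt
    constructor
    · rintro (⟨i, hi, hm⟩ | hm)
      · exact ⟨i, Nat.lt_succ_of_lt hi, hm⟩
      · exact ⟨n, Nat.lt_succ_self n, hm⟩
    · rintro ⟨i, hi, hm⟩
      rcases Nat.lt_succ_iff_lt_or_eq.mp hi with h | rfl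
      · exact Or.inl ⟨i, h, hm⟩
      · exact Or.inr hm

lemma pvNEGPREF_ne_nil : ∀ n ∈ pvNEGPREF, n.toList ≠ [] := by decide
lemma pvBase_ne_nil : ∀ q ∈ pvPOS ++ pvNEG ++ pvHEDGING ++ pvSTRONG, q.toList ≠ [] := by decide

lemma pvALL_ne_nil (q : String) (hq : q ∈ pvALL) : q.toList ≠ [] := by
  unfold pvALL at hq
  simp only [List.mem_append] at hq
  rcases hq with ((((h | h) | h) | h) | h) | h
  · exact pvBase_ne_nil q (by simp [List.mem_append, h])
  · exact pvBase_ne_nil q (by simp [List.mem_append, h])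
  · exact pvBase_ne_nil q (by simp [List.mem_append, h])
  · exact pvBase_ne_nil q (by simp [List.mem_append, h])
  all_goals {
    simp only [pvNEGATEDPOS, pvNEGATEDNEG, List.mem_flatMap, List.mem_map] at h
    obtain ⟨n, hn, p, _, rfl⟩ := h
    simp only [String.toList_append, ne_eq, List.append_eq_nil_iff, not_and]
    intro hnil
    exact absurd hnil (pvNEGPREF_ne_nil n hn) }

-- at an in-range position, bucket membership is implied by the match itself
lemma pvAt (chars : List Char) (i : Nat) (q : String) (hq : q ∈ pvALL) :
    (q ∈ pvBucketAt chars i ∧ pvMatchAt chars i q = true) ↔ q.toList <+: chars.drop i := by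
  rw [pvMatchAt_iff]
  constructor
  · exact fun h => h.2
  · intro hp
    refine ⟨?_, hp⟩
    obtain ⟨hc, rest, hql⟩ : ∃ hc rest, q.toList = hc :: rest := by
      cases hql : q.toList with
      | nil => exact absurd hql (pvALL_ne_nil q hq)
      | cons a l => exact ⟨a, l, rfl⟩
    have hhead : (chars.drop i).head? = some hc := by
      obtain ⟨t, ht⟩ := hp
      rw [← ht, hql]
      rfl
    unfold pvBucketAt
    rw [← List.head?_drop, hhead]
    rw [pvBY_mem, hql]
    exact ⟨hq, rfl⟩

lemma pvScan_mem (chars : List Char) (q : String) (hq : q ∈ pvALL) :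
    q ∈ pvScan chars ↔ ∃ i < chars.length, q.toList <+: chars.drop i := by
  unfold pvScan
  rw [pvScan_fold]
  constructor
  · rintro ⟨i, hi, hm⟩
    exact ⟨i, hi, (pvAt chars i q hq).mp hm⟩
  · rintro ⟨i, hi, hp⟩
    exact ⟨i, hi, (pvAt chars i q hq).mpr hp⟩

lemma pvExists_prefix_iff (chars : List Char) (q : String) (hq : q.toList ≠ []) :
    (∃ i < chars.length, q.toList <+: chars.drop i) ↔ PySem.Chars.isIn q.toList chars = true := by
  rw [← PySem.Chars.exists_prefix_drop_iff_isIn]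
  constructor
  · rintro ⟨i, _, hm⟩
    exact ⟨i, hm⟩
  · rintro ⟨j, hp⟩
    by_cases hj : j < chars.length
    · exact ⟨j, hj, hp⟩
    · exfalso
      have : chars.drop j = [] := List.drop_eq_nil_of_le (Nat.le_of_not_lt hj)
      rw [this] at hp
      exact hq (List.prefix_nil.mp hp)

-- the scan finds a pattern iff it is a substring
lemma pvContains_scan (tl : String) (q : String) (hq : q ∈ pvALL) :
    PySem.Set.contains (pvScan tl.toList) q = PySem.Str.isIn q tl := by
  have h1 : PySem.Set.contains (pvScan tl.toList) q = true ↔ PySem.Str.isIn q tl = true := by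
    rw [PySem.Set.contains_iff, pvScan_mem tl.toList q hq, PySem.Str.isIn_eq,
        ← pvExists_prefix_iff tl.toList q (pvALL_ne_nil q hq)]
  cases hbool : PySem.Str.isIn q tl
  · cases hc : PySem.Set.contains (pvScan tl.toList) q
    · rfl
    · rw [hbool] at h1; exact absurd (h1.mp hc) (by simp)
  · exact h1.mpr hbool

lemma pvCountF_eq_pvCountIn (L : List String) (tl : String) (hL : ∀ x ∈ L, x ∈ pvALL) :
    pvCountF L (pvScan tl.toList) = pvCountIn L tl := by
  unfold pvCountF pvCountIn
  refine PySem.List.foldl_congr_mem L _ _ 0 (fun acc x hx => ?_)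
  rw [pvContains_scan tl x (hL x hx)]

lemma pvSub_POS : ∀ x ∈ pvPOS, x ∈ pvALL := by intro x h; simp [pvALL, List.mem_append]; tauto
lemma pvSub_NEG : ∀ x ∈ pvNEG, x ∈ pvALL := by intro x h; simp [pvALL, List.mem_append]; tauto
lemma pvSub_HEDGING : ∀ x ∈ pvHEDGING, x ∈ pvALL := by intro x h; simp [pvALL, List.mem_append]; tauto
lemma pvSub_STRONG : ∀ x ∈ pvSTRONG, x ∈ pvALL := by intro x h; simp [pvALL, List.mem_append]; tauto
lemma pvSub_NEGATEDPOS : ∀ x ∈ pvNEGATEDPOS, x ∈ pvALL := by intro x h; simp [pvALL, List.mem_append]; tauto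
lemma pvSub_NEGATEDNEG : ∀ x ∈ pvNEGATEDNEG, x ∈ pvALL := by intro x h; simp [pvALL, List.mem_append]; tauto

lemma pvFoldl_if_sub_one {α : Type} (l : List α) (p : α → Bool) (a : Int) :
    l.foldl (fun acc x => if p x then acc - 1 else acc) a = a - l.countP p := by
  induction l generalizing a with
  | nil => simp
  | cons x t ih =>
    by_cases h : p x = true <;> simp [List.foldl_cons, ih, h] <;> ring

-- A's interleaved negation loop equals (count of negated positives) − (count of negated negatives)
lemma pvCountP_flatMap_map (l L : List String) (f : String → String → String) (p : String → Bool) :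
    (l.flatMap (fun n => L.map (f n))).countP p
      = (l.map (fun n => (L.countP (fun x => p (f n x)) : Int))).sum := by
  induction l with
  | nil => simp
  | cons n t ih =>
    simp only [List.flatMap_cons, List.countP_append, List.countP_map, List.map_cons,
      List.sum_cons]
    push_cast
    rw [ih]
    simp only [Function.comp_def]

-- A's interleaved negation loop equals (count of negated positives) − (count of negated negatives)
lemma pvFlipsA_eq (tl : String) :
    pvFlipsA tl = pvCountIn pvNEGATEDPOS tl - pvCountIn pvNEGATEDNEG tl := by
  unfold pvFlipsA pvCountIn pvNEGATEDPOS pvNEGATEDNEG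
  rw [PySem.List.foldl_if_add_one, PySem.List.foldl_if_add_one]
  rw [PySem.List.foldl_congr_mem pvNEGPREF _
      (fun acc neg => acc + (((pvPOS.countP (fun p => PySem.Str.isIn (neg ++ p) tl)) : Int)
        - ((pvNEG.countP (fun t => PySem.Str.isIn (neg ++ t) tl)) : Int))) 0
      (fun acc neg _ => by
        rw [PySem.List.foldl_if_add_one, pvFoldl_if_sub_one]; ring)]
  rw [PySem.List.foldl_add]
  rw [pvCountP_flatMap_map, pvCountP_flatMap_map]
  have hsub : ∀ (l : List String) (A B : String → Int),
      (l.map (fun n => A n - B n)).sum = (l.map A).sum - (l.map B).sum := by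
    intro l A B
    induction l with
    | nil => simp
    | cons x t ih => simp only [List.map_cons, List.sum_cons, ih]; ring
  rw [hsub]
  ring

-- ===== VERDICT (by name: the statement is the Claim_ definition above) =====
theorem detect_stance_spec : Claim_equal_detect_stance := by
  intro text _
  unfold Spec_detect_stance
  simp only [detect_stance, detect_stance_alt]
  rw [pvCountF_eq_pvCountIn pvPOS _ pvSub_POS,
      pvCountF_eq_pvCountIn pvNEG _ pvSub_NEG,
      pvCountF_eq_pvCountIn pvHEDGING _ pvSub_HEDGING,
      pvCountF_eq_pvCountIn pvSTRONG _ pvSub_STRONG,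
      pvCountF_eq_pvCountIn pvNEGATEDPOS _ pvSub_NEGATEDPOS,
      pvCountF_eq_pvCountIn pvNEGATEDNEG _ pvSub_NEGATEDNEG,
      pvFlipsA_eq]
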